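-- pv_equiv track=rewrite | github.com/rukon-uddin/GeneRegulation | networkInfer.py | generate_permutations_with_indices
-- ===== SOURCE A (Python) =====
-- def generate_permutations_with_indices(arr, r):
--     from itertools import permutations
--     n = len(arr)
--     result = []
--
--     # Generate all possible permutations using indices
--     for perm in permutations(range(n), r):
--         # Create a dictionary with index-value pairs
--         permutation_dict = {i: arr[i] for i in perm}
--         result.append(permutation_dict)
--
--     return result
-- ===== SOURCE B (Python) =====
-- def generate_permutations_with_indices(arr, r):
--     n = len(arr)
--     result = []
--
--     def backtrack(chosen, used):
--         if len(chosen) == r: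
--             result.append({j: arr[j] for j in chosen})
--             return
--         for i in range(n):
--             if not used[i]:
--                 used[i] = True
--                 chosen.append(i)
--                 backtrack(chosen, used)
--                 chosen.pop()
--                 used[i] = False
--
--     backtrack([], [False] * n)
--     return result
-- ===== Notes on version B (the rewrite author's own statement) =====
-- stated objective: alternative
-- what changed: Replaces the itertools.permutations library call with an explicit recursive backtracking generator over a used-flags array that emits index permutations in the same lexicographic order.
import Mathlib
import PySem

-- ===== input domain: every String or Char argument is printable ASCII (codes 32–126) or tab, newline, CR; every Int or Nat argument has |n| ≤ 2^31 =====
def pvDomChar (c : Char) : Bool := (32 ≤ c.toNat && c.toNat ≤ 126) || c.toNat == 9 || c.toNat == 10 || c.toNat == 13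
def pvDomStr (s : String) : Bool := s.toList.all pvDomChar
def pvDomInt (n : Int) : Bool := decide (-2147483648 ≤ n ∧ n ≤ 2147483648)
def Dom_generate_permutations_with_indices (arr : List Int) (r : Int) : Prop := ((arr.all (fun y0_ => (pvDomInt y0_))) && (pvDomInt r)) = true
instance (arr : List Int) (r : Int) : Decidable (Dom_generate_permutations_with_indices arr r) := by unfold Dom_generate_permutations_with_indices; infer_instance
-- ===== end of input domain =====

-- B replaces the itertools.permutations call with a recursive backtracking generator
-- over a used-flags array; same output (order and all), no speed claim.


-- ===== PORT A =====
-- dict {i: arr[i] for i in perm}: the indices in perm are distinct, so the dict is the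
-- association list of (i, arr[i]) in perm's order; arr[i] is always in range (exact via getD).
def pvPairs (arr : List Int) (perm : List Nat) : List (Int × Int) :=
  perm.map (fun i => (Int.ofNat i, arr.getD i 0))

-- itertools.permutations(pool, k) in lexicographic-by-pool-order: pick each element of the
-- remaining pool in order, recurse on the pool with that element erased.
def permsA (k : Nat) (pool : List Nat) : List (List Nat) :=
  match k with
  | 0 => [[]]
  | k + 1 => pool.flatMap (fun x => (permsA k (pool.erase x)).map (fun p => x :: p))

def generate_permutations_with_indices (arr : List Int) (r : Int) : List (List (Int × Int)) :=
  (permsA r.toNat (List.range arr.length)).map (fun perm => pvPairs arr perm)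

-- ===== PORT B =====
-- backtrack(chosen, used): emit when len(chosen) == r, else try each unused index i in
-- increasing order. The Python recursion terminates because each level marks one index used;
-- fuel = number of still-unused indices makes that explicit (started at n, never exhausted early).
def goB (arr : List Int) (r : Int) (fuel : Nat) (used : List Bool) (chosen : List Nat) :
    List (List (Int × Int)) :=
  if (chosen.length : Int) = r then [pvPairs arr chosen]
  else
    match fuel with
    | 0 => []
    | fuel + 1 =>
      (List.range arr.length).flatMap (fun i =>
        if used.getD i true then []
        else goB arr r fuel (used.set i true) (chosen ++ [i]))

def generate_permutations_with_indices_alt (arr : List Int) (r : Int) : List (List (Int × Int)) :=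
  goB arr r arr.length (List.replicate arr.length false) []

-- ===== PRECONDITION & SPEC =====
-- Pre_ excludes exactly r < 0, on which Python A raises ValueError (itertools.permutations).
def Pre_generate_permutations_with_indices (arr : List Int) (r : Int) : Prop := 0 ≤ r
instance (arr : List Int) (r : Int) : Decidable (Pre_generate_permutations_with_indices arr r) := by unfold Pre_generate_permutations_with_indices; infer_instance
def pvWitness_generate_permutations_with_indices : List Int × Int := ([3, 1, 4], 2)

def Spec_generate_permutations_with_indices (arr : List Int) (r : Int) (out : List (List (Int × Int))) : Prop := out = generate_permutations_with_indices_alt arr r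
instance (arr : List Int) (r : Int) (out : List (List (Int × Int))) : Decidable (Spec_generate_permutations_with_indices arr r out) := by unfold Spec_generate_permutations_with_indices; infer_instance

-- ===== CLAIM (what is proved, stated in full; the proofs are below) =====
def Claim_equal_generate_permutations_with_indices : Prop := ∀ (arr : List Int) (r : Int), Dom_generate_permutations_with_indices arr r → Pre_generate_permutations_with_indices arr r → Spec_generate_permutations_with_indices arr r (generate_permutations_with_indices arr r)

-- ===== LEMMAS AND PROOFS =====

-- a flatMap whose function returns [] on elements failing p is a flatMap over the filter
lemma flatMap_guard {α : Type} (l : List Nat) (p : Nat → Bool) (f : Nat → List α) :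
    l.flatMap (fun i => if p i then [] else f i) = (l.filter (fun i => !p i)).flatMap f := by
  induction l with
  | nil => rfl
  | cons a t ih =>
    by_cases h : p a = true <;> simp [List.flatMap_cons, h, ih]

-- marking index i used removes exactly i from the candidate pool
lemma filter_set_erase (n : Nat) (used : List Bool) (i : Nat)
    (hlen : used.length = n) (hi : i < n) (hu : used.getD i true = false) :
    (List.range n).filter (fun j => !(used.set i true).getD j true) =
      ((List.range n).filter (fun j => !used.getD j true)).erase i := by
  rw [List.Nodup.erase_eq_filter (List.Nodup.filter _ (List.nodup_range)), List.filter_filter]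
  apply List.filter_congr
  intro j hj
  have hjn : j < n := List.mem_range.mp hj
  by_cases hij : j = i
  · subst hij
    simp [List.getD, List.getElem?_set_self (by omega : j < used.length)]
  · simp [List.getD, List.getElem?_set_ne (fun h => hij h.symm), hij]

-- main invariant: the backtracking call equals the itertools recursion over the current pool
lemma goB_eq (arr : List Int) (r : Int) (hr : 0 ≤ r) :
    ∀ (fuel : Nat) (used : List Bool) (chosen : List Nat),
      used.length = arr.length →
      ((List.range arr.length).filter (fun j => !used.getD j true)).length ≤ fuel →
      chosen.length ≤ r.toNat →
      goB arr r fuel used chosen =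
        (permsA (r.toNat - chosen.length)
            ((List.range arr.length).filter (fun j => !used.getD j true))).map
          (fun perm => pvPairs arr (chosen ++ perm)) := by
  intro fuel
  induction fuel with
  | zero =>
    intro used chosen hlen hpool hch
    have hp : (List.range arr.length).filter (fun j => !used.getD j true) = [] :=
      List.eq_nil_of_length_eq_zero (Nat.le_zero.mp hpool)
    rw [hp]
    by_cases hc : (chosen.length : Int) = r
    · have h0 : r.toNat - chosen.length = 0 := by omega
      simp [goB, hc, h0, permsA]
    · have hlt : chosen.length < r.toNat := by omega
      obtain ⟨m, hm⟩ : ∃ m, r.toNat - chosen.length = m + 1 :=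
        ⟨r.toNat - chosen.length - 1, by omega⟩
      simp [goB, hc, hm, permsA]
  | succ fuel ih =>
    intro used chosen hlen hpool hch
    by_cases hc : (chosen.length : Int) = r
    · have h0 : r.toNat - chosen.length = 0 := by omega
      simp [goB, hc, h0, permsA]
    · have hlt : chosen.length < r.toNat := by omega
      obtain ⟨m, hm⟩ : ∃ m, r.toNat - chosen.length = m + 1 :=
        ⟨r.toNat - chosen.length - 1, by omega⟩
      rw [goB]
      simp only [hc, if_false]
      rw [flatMap_guard, hm, permsA, List.map_flatMap]
      apply List.flatMap_congr
      intro x hx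
      have hxr : x ∈ List.range arr.length := List.mem_filter.mp hx |>.1
      have hxn : x < arr.length := List.mem_range.mp hxr
      have hxu : used.getD x true = false := by
        have := (List.mem_filter.mp hx).2; simpa using this
      have hfe := filter_set_erase arr.length used x hlen hxn hxu
      have hlen' : (used.set x true).length = arr.length := by simp [hlen]
      have hple : ((List.range arr.length).filter
          (fun j => !(used.set x true).getD j true)).length ≤ fuel := by
        rw [hfe, List.length_erase_of_mem hx]
        have hpos : 0 < ((List.range arr.length).filter
            (fun j => !used.getD j true)).length := List.length_pos_of_mem hx
        omega
      have := ih (used.set x true) (chosen ++ [x]) hlen' hple (by simp; omega)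
      rw [this, hfe]
      have hmm : r.toNat - (chosen ++ [x]).length = m := by simp; omega
      rw [hmm, List.map_map]
      apply List.map_congr_left
      intro p _
      simp [pvPairs]

lemma replicate_filter (n : Nat) :
    (List.range n).filter (fun j => !(List.replicate n false).getD j true) = List.range n := by
  apply List.filter_eq_self.mpr
  intro j hj
  have hjn : j < n := List.mem_range.mp hj
  simp [List.getD, hjn]

-- ===== VERDICT (by name: the statement is the Claim_ definition above) =====
theorem generate_permutations_with_indices_spec : Claim_equal_generate_permutations_with_indices := by
  intro arr r _ hpre
  unfold Spec_generate_permutations_with_indices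
  unfold generate_permutations_with_indices generate_permutations_with_indices_alt
  have h := goB_eq arr r hpre arr.length (List.replicate arr.length false) []
    (by simp) (by rw [replicate_filter]; simp) (by simp)
  rw [h, replicate_filter]
  simp
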